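-- pv_equiv track=rewrite | github.com/alexrysin/alex-rysin-website | scripts/list-all-fb-posts.py | strip_metadata
-- ===== SOURCE A (Python) =====
-- def strip_metadata(text):
--     """Strip 'You tagged ...' and similar metadata from start."""
--     lines = text.split("\n")
--     out = []
--     skipping = True
--     for ln in lines:
--         s = ln.strip()
--         if skipping and (s.startswith("You tagged") or s.startswith("You were")
--                          or s.startswith("Updated ") or not s):
--             continue
--         skipping = False
--         out.append(ln)
--     return "\n".join(out).strip()
-- ===== SOURCE B (Python) =====
-- def strip_metadata(text):
--     """Strip 'You tagged ...' and similar metadata from start."""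
--     lines = text.split("\n")
--     start = 0
--     while start < len(lines):
--         s = lines[start].strip()
--         if not (s.startswith("You tagged") or s.startswith("You were")
--                 or s.startswith("Updated ") or not s):
--             break
--         start += 1
--     return "\n".join(lines[start:]).strip()
-- ===== Notes on version B (the rewrite author's own statement) =====
-- stated objective: alternative
-- what changed: Replaces the single accumulator pass with a skipping flag by a two-phase approach: an index loop that only advances a start index past leading metadata/blank lines, then a slice-and-join of the untouched tail.
import Mathlib
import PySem

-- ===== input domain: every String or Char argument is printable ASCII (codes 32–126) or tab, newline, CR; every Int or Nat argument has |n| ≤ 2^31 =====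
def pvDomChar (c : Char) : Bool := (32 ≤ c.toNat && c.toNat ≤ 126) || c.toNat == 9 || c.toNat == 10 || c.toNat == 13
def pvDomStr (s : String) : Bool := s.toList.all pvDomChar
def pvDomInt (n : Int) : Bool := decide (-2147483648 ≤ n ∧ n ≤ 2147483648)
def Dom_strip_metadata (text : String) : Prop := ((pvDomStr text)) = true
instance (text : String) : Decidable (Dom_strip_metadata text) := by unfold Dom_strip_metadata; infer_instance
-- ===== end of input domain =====

-- B keeps only a start index over the split lines and joins the untouched tail,
-- instead of A's accumulator list with a skipping flag; same return value, no speed claim.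

-- shared metadata-line predicate (the parenthesised condition both Pythons test)
def metaLine (ln : List Char) : Bool :=
  let s := PySem.Chars.strip ln
  PySem.Chars.startswith s "You tagged".toList || PySem.Chars.startswith s "You were".toList ||
    PySem.Chars.startswith s "Updated ".toList || (s == [])

-- ===== PORT A =====
-- A's loop body: state = (out, skipping)
def aStep (st : List (List Char) × Bool) (ln : List Char) : List (List Char) × Bool :=
  if st.2 && metaLine ln then st else (st.1 ++ [ln], false)

def strip_metadata (text : String) : String :=
  let lines := PySem.Chars.splitOn text.toList ['\n']
  let st := lines.foldl aStep ([], true)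
  String.mk (PySem.Chars.strip (PySem.Chars.join ['\n'] st.1))

-- ===== PORT B =====
-- B's while loop: advance `start` past leading metadata lines (fuel = remaining length)
def altStart (lines : List (List Char)) (start : Nat) : Nat :=
  if h : start < lines.length then
    if metaLine lines[start] then altStart lines (start + 1) else start
  else start
termination_by lines.length - start

def strip_metadata_alt (text : String) : String :=
  let lines := PySem.Chars.splitOn text.toList ['\n']
  let start := altStart lines 0
  -- lines[start:] with start ≥ 0 is List.drop
  String.mk (PySem.Chars.strip (PySem.Chars.join ['\n'] (lines.drop start)))

-- ===== PRECONDITION & SPEC =====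
def Spec_strip_metadata (text : String) (out : String) : Prop := out = strip_metadata_alt text
instance (text : String) (out : String) : Decidable (Spec_strip_metadata text out) := by unfold Spec_strip_metadata; infer_instance

-- ===== CLAIM (what is proved, stated in full; the proofs are below) =====
def Claim_equal_strip_metadata : Prop := ∀ (text : String), Dom_strip_metadata text → Spec_strip_metadata text (strip_metadata text)

-- ===== LEMMAS AND PROOFS =====

-- once skipping is false, A appends every remaining line
lemma foldA_false (ls : List (List Char)) (out : List (List Char)) :
    ls.foldl aStep (out, false) = (out ++ ls, false) := by
  induction ls generalizing out with
  | nil => simp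
  | cons ln rest ih => simp [aStep, ih]

-- with skipping still true, A's output is the accumulator plus the lines past the leading metadata
lemma foldA_true (ls : List (List Char)) (out : List (List Char)) :
    (ls.foldl aStep (out, true)).1 = out ++ ls.dropWhile metaLine := by
  induction ls generalizing out with
  | nil => simp
  | cons ln rest ih =>
    by_cases h : metaLine ln
    · simp [aStep, h, ih, List.dropWhile]
    · simp [aStep, h, foldA_false, List.dropWhile]

-- B's index loop computes the same suffix
lemma drop_altStart (lines : List (List Char)) (start : Nat) :
    lines.drop (altStart lines start) = (lines.drop start).dropWhile metaLine := by
  by_cases h : start < lines.length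
  · rw [List.drop_eq_getElem_cons h]
    by_cases hm : metaLine lines[start]
    · rw [altStart, dif_pos h, if_pos hm, drop_altStart lines (start + 1)]
      simp [List.dropWhile, hm]
    · rw [altStart, dif_pos h, if_neg hm, List.drop_eq_getElem_cons h]
      simp [List.dropWhile, hm]
  · have h1 : altStart lines start = start := by rw [altStart, dif_neg h]
    rw [h1, List.drop_eq_nil_of_le (by omega)]
    simp
termination_by lines.length - start
decreasing_by omega

-- ===== VERDICT (by name: the statement is the Claim_ definition above) =====
theorem strip_metadata_spec : Claim_equal_strip_metadata := by
  intro text _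
  show strip_metadata text = strip_metadata_alt text
  simp only [strip_metadata, strip_metadata_alt, drop_altStart, List.drop_zero, foldA_true,
    List.nil_append]
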